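-- pv_equiv track=rewrite | github.com/shaozheng0503/shudongmiao | backend/app/services/response_parser.py | _strip_markdown_code_fence
-- ===== SOURCE A (Python) =====
-- def _strip_markdown_code_fence(text: str) -> str:
--     """去掉 ``` 或 ```json 包裹，减少模型套 markdown 导致的解析失败。"""
--     stripped = text.strip()
--     if not stripped.startswith("```"):
--         return text
--     lines = stripped.splitlines()
--     if not lines:
--         return text
--     # 去掉首行 ``` 或 ```json
--     lines = lines[1:]
--     while lines and not lines[-1].strip():
--         lines.pop()
--     if lines and lines[-1].strip() == "```":
--         lines = lines[:-1]
--     return "\n".join(lines).strip()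
-- ===== SOURCE B (Python) =====
-- def _strip_markdown_code_fence(text: str) -> str:
--     """String-slicing re-implementation: normalise line endings once, then cut
--     the opening fence line and an optional closing fence with find/rfind slices
--     instead of building and mutating a list of lines."""
--     stripped = text.strip()
--     if not stripped.startswith("```"):
--         return text
--     norm = stripped.replace("\r\n", "\n").replace("\r", "\n")
--     nl = norm.find("\n")
--     body = "" if nl == -1 else norm[nl + 1:]
--     body = body.rstrip()
--     cut = body.rfind("\n") + 1
--     if body[cut:].strip() == "```":
--         body = body[:cut]
--     return body.strip()
-- ===== Notes on version B (the rewrite author's own statement) =====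
-- stated objective: alternative
-- what changed: B replaces A's line-list pipeline (splitlines, mutating pops of trailing blank lines, list slicing, '\n'.join) by direct string slicing: it normalises line endings once with replace, cuts the opening fence line with find, trims with rstrip, and removes an optional closing fence located with rfind.
import Mathlib
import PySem

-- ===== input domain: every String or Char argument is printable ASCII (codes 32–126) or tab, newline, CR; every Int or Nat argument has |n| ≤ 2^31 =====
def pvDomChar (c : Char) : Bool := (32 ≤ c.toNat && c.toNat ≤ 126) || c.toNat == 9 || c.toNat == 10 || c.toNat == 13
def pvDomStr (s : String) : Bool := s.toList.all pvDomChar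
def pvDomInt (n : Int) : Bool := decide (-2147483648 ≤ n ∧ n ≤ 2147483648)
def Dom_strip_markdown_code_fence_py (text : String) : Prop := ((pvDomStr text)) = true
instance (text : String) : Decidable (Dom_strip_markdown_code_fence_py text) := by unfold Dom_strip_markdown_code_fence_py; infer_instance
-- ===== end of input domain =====

-- B re-implements the markdown-fence stripper by direct string slicing (replace/find/rstrip/rfind)
-- instead of A's mutated line list (splitlines/pop/join); same result, proved equal on the domain.

-- ===== PORT A =====
-- Python's 'while lines and not lines[-1].strip(): lines.pop()' — a pop-from-the-end
-- loop, transcribed as reverse/dropWhile/reverse over the same blank-line test.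
def pvPopBlank (lines : List (List Char)) : List (List Char) :=
  (lines.reverse.dropWhile (fun l => (PySem.Chars.strip l).isEmpty)).reverse

def strip_markdown_code_fence_py (text : String) : String :=
  let stripped := PySem.Chars.strip text.toList
  if PySem.Chars.startswith stripped ['`', '`', '`'] = false then text
  else
    let lines := PySem.Chars.splitlines stripped
    if lines.isEmpty then text
    else
      let lines1 := lines.tail
      let lines2 := pvPopBlank lines1
      let lines3 :=
        match lines2.getLast? with
        | some last => if PySem.Chars.strip last = ['`', '`', '`'] then lines2.dropLast else lines2
        | none => lines2
      String.ofList (PySem.Chars.strip (PySem.Chars.join ['\n'] lines3))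

-- ===== PORT B =====
def strip_markdown_code_fence_py_alt (text : String) : String :=
  let stripped := PySem.Chars.strip text.toList
  if PySem.Chars.startswith stripped ['`', '`', '`'] = false then text
  else
    let norm := PySem.Chars.replace (PySem.Chars.replace stripped ['\r', '\n'] ['\n']) ['\r'] ['\n']
    let nl := PySem.Chars.find norm ['\n']
    let body0 := if nl = -1 then [] else PySem.List.slice norm (some (nl + 1)) none
    let body1 := PySem.Chars.rstrip body0
    let cut := PySem.Chars.rfind body1 ['\n'] + 1
    let body2 :=
      if PySem.Chars.strip (PySem.List.slice body1 (some cut) none) = ['`', '`', '`'] then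
        PySem.List.slice body1 none (some cut)
      else body1
    String.ofList (PySem.Chars.strip body2)

-- ===== PRECONDITION & SPEC =====
def Spec_strip_markdown_code_fence_py (text : String) (out : String) : Prop := out = strip_markdown_code_fence_py_alt text
instance (text : String) (out : String) : Decidable (Spec_strip_markdown_code_fence_py text out) := by unfold Spec_strip_markdown_code_fence_py; infer_instance

-- ===== CLAIM (what is proved, stated in full; the proofs are below) =====
def Claim_equal_strip_markdown_code_fence_py : Prop := ∀ (text : String), Dom_strip_markdown_code_fence_py text → Spec_strip_markdown_code_fence_py text (strip_markdown_code_fence_py text)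

-- ===== LEMMAS AND PROOFS =====

-- whitespace toolbox
theorem pv_rstrip_eq_nil_iff (l : List Char) :
    PySem.Chars.rstrip l = [] ↔ ∀ c ∈ l, PySem.Chars.isspace c = true := by
  simp [PySem.Chars.rstrip, List.dropWhile_eq_nil_iff]

theorem pv_lstrip_eq_nil_iff (l : List Char) :
    PySem.Chars.lstrip l = [] ↔ ∀ c ∈ l, PySem.Chars.isspace c = true := by
  simp [PySem.Chars.lstrip, List.dropWhile_eq_nil_iff]

theorem pv_strip_eq_nil_iff (l : List Char) :
    PySem.Chars.strip l = [] ↔ ∀ c ∈ l, PySem.Chars.isspace c = true := by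
  constructor
  · intro h c hc
    have h2 := (pv_rstrip_eq_nil_iff _).mp h
    by_cases hsp : PySem.Chars.isspace c = true
    · exact hsp
    · -- c survives lstrip
      have : c ∈ PySem.Chars.lstrip l := by
        have := List.takeWhile_append_dropWhile (p := PySem.Chars.isspace) (l := l)
        rcases (List.mem_append.mp (by rw [this]; exact hc)) with h1 | h1
        · exact absurd (List.mem_takeWhile_imp h1) hsp
        · exact h1
      exact h2 c this
  · intro h
    have : PySem.Chars.lstrip l = [] := (pv_lstrip_eq_nil_iff l).mpr h
    simp [PySem.Chars.strip, this, PySem.Chars.rstrip]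

theorem pv_rstrip_append_space {w : List Char} (hw : ∀ c ∈ w, PySem.Chars.isspace c = true)
    (a : List Char) : PySem.Chars.rstrip (a ++ w) = PySem.Chars.rstrip a := by
  simp [PySem.Chars.rstrip, List.dropWhile_append]
  intro x hx1 hx2
  exact absurd (hw x (by simpa using hx1)) (by simpa using hx2)

theorem pv_rstrip_append_of_ne_nil {x : List Char} (hx : PySem.Chars.rstrip x ≠ [])
    (a : List Char) : PySem.Chars.rstrip (a ++ x) = a ++ PySem.Chars.rstrip x := by
  simp only [PySem.Chars.rstrip] at *
  rw [List.reverse_append, List.dropWhile_append]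
  have : ¬ (List.dropWhile PySem.Chars.isspace x.reverse).isEmpty = true := by
    intro h
    rw [List.isEmpty_iff] at h
    exact hx (by simp [h])
  simp [this]

theorem pv_rstrip_decomp (x : List Char) :
    ∃ w, x = PySem.Chars.rstrip x ++ w ∧ ∀ c ∈ w, PySem.Chars.isspace c = true := by
  refine ⟨(List.takeWhile PySem.Chars.isspace x.reverse).reverse, ?_, ?_⟩
  · conv_lhs => rw [← x.reverse_reverse,
      ← List.takeWhile_append_dropWhile (p := PySem.Chars.isspace) (l := x.reverse)]
    rw [List.reverse_append]
    rfl
  · intro c hc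
    exact List.mem_takeWhile_imp (by simpa using hc)

theorem pv_strip_append_space {w : List Char} (hw : ∀ c ∈ w, PySem.Chars.isspace c = true)
    (a : List Char) : PySem.Chars.strip (a ++ w) = PySem.Chars.strip a := by
  by_cases ha : PySem.Chars.lstrip a = []
  · have haw : ∀ c ∈ a, PySem.Chars.isspace c = true := (pv_lstrip_eq_nil_iff a).mp ha
    have : ∀ c ∈ a ++ w, PySem.Chars.isspace c = true := by
      intro c hc; rcases List.mem_append.mp hc with h | h; exacts [haw c h, hw c h]
    rw [(pv_strip_eq_nil_iff _).mpr this, (pv_strip_eq_nil_iff a).mpr haw]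
  · have h1 : PySem.Chars.lstrip (a ++ w) = PySem.Chars.lstrip a ++ w := by
      simp only [PySem.Chars.lstrip] at *
      rw [List.dropWhile_append]
      simp [List.isEmpty_iff, ha]
    simp only [PySem.Chars.strip, h1]
    exact pv_rstrip_append_space hw _

theorem pv_strip_rstrip (x : List Char) :
    PySem.Chars.strip (PySem.Chars.rstrip x) = PySem.Chars.strip x := by
  obtain ⟨w, hx, hw⟩ := pv_rstrip_decomp x
  conv_rhs => rw [hx]
  rw [pv_strip_append_space hw]

-- reference replace (nonempty pattern o :: old)
def pvRep (o : Char) (old new : List Char) : List Char → List Char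
  | [] => []
  | c :: t =>
      if (o :: old).isPrefixOf (c :: t) then new ++ pvRep o old new (t.drop old.length)
      else c :: pvRep o old new t
termination_by l => l.length
decreasing_by all_goals (simp; try omega)

theorem pvRep_nil (o : Char) (old new : List Char) : pvRep o old new [] = [] := by
  rw [pvRep.eq_def]

theorem pvRep_cons (o : Char) (old new : List Char) (c : Char) (t : List Char) :
    pvRep o old new (c :: t) =
      if (o :: old).isPrefixOf (c :: t) then new ++ pvRep o old new (t.drop old.length)
      else c :: pvRep o old new t := by
  rw [pvRep.eq_def]

theorem pv_replace_go_spec (o : Char) (old new : List Char) :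
    ∀ fuel l acc, l.length ≤ fuel →
      PySem.Chars.replace.go (o :: old) new fuel l acc = acc.reverse ++ pvRep o old new l := by
  intro fuel
  induction fuel with
  | zero =>
    intro l acc h
    have hl : l = [] := List.eq_nil_of_length_eq_zero (Nat.le_zero.mp h)
    subst hl
    simp [PySem.Chars.replace.go, pvRep_nil]
  | succ n ih =>
    intro l acc h
    match l with
    | [] => simp [PySem.Chars.replace.go, pvRep_nil]
    | c :: t =>
      rw [PySem.Chars.replace.go]
      by_cases hp : (o :: old).isPrefixOf (c :: t) = true
      · rw [if_pos hp, pvRep_cons, if_pos hp]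
        rw [ih _ _ (by simp at h ⊢; omega)]
        simp
      · rw [if_neg hp, pvRep_cons, if_neg hp]
        rw [ih _ _ (by simp at h ⊢; omega)]
        simp

theorem pv_replace_eq (o : Char) (old new l : List Char) :
    PySem.Chars.replace l (o :: old) new = pvRep o old new l := by
  rw [PySem.Chars.replace]
  simp [pv_replace_go_spec o old new l.length l []]

-- reference CRLF/CR normaliser
def pvNorm : List Char → List Char
  | [] => []
  | '\r' :: '\n' :: r => '\n' :: pvNorm r
  | '\r' :: r => '\n' :: pvNorm r
  | c :: r => c :: pvNorm r

theorem pvNorm_nil : pvNorm [] = [] := by rw [pvNorm]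

theorem pv_norm_eq (s : List Char) :
    PySem.Chars.replace (PySem.Chars.replace s ['\r', '\n'] ['\n']) ['\r'] ['\n'] = pvNorm s := by
  rw [pv_replace_eq, pv_replace_eq]
  induction s using pvNorm.induct with
  | case1 => simp [pvRep_nil, pvNorm_nil]
  | case2 r ih =>
      rw [pvNorm, pvRep_cons, if_pos (by simp [List.isPrefixOf])]
      simp only [List.length_cons, List.length_nil, List.drop_succ_cons, List.drop_zero,
        List.singleton_append]
      rw [pvRep_cons, if_neg (by simp [List.isPrefixOf])]
      rw [ih]
  | case3 r hne ih =>
      rw [pvNorm]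
      case x_1 => exact hne
      rw [pvRep_cons, if_neg (by
        cases r with
        | nil => simp [List.isPrefixOf]
        | cons d t =>
            have hd : ('\n' : Char) ≠ d := by intro h; exact hne t (by rw [← h])
            simp [List.isPrefixOf, hd])]
      rw [pvRep_cons, if_pos (by simp [List.isPrefixOf])]
      simp only [List.length_nil, List.drop_zero, List.singleton_append]
      rw [ih]
  | case4 c r hne1 hne2 ih =>
      have hc1 : ('\r' : Char) ≠ c := fun h => hne2 h.symm
      rw [pvNorm]
      case x_1 => exact hne1
      case x_2 => exact hne2
      rw [pvRep_cons, if_neg (by simp [List.isPrefixOf]; intro h; exact absurd h.symm hne2)]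
      rw [pvRep_cons, if_neg (by simp [List.isPrefixOf, hc1])]
      rw [ih]

-- reference line splitter
def pvLines : List Char → List (List Char)
  | [] => []
  | '\r' :: '\n' :: r => [] :: pvLines r
  | c :: r =>
      if c = '\n' ∨ c = '\r' then [] :: pvLines r
      else
        match pvLines r with
        | [] => [[c]]
        | l :: ls => (c :: l) :: ls

theorem pvLines_nil : pvLines [] = [] := by rw [pvLines]

theorem pvLines_crlf (r : List Char) : pvLines ('\r' :: '\n' :: r) = [] :: pvLines r := by
  rw [pvLines]

theorem pvLines_cons (c : Char) (r : List Char)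
    (hg : ∀ r1, c = '\r' → r = '\n' :: r1 → False) :
    pvLines (c :: r) =
      if c = '\n' ∨ c = '\r' then [] :: pvLines r
      else
        match pvLines r with
        | [] => [[c]]
        | l :: ls => (c :: l) :: ls := by
  rw [pvLines]
  case x_1 => exact hg

theorem pvLines_ne_nil (s : List Char) (h : s ≠ []) : pvLines s ≠ [] := by
  induction s using pvLines.induct with
  | case1 => exact absurd rfl h
  | case2 => rw [pvLines_crlf]; simp
  | case3 c r h1 h2 ih => rw [pvLines_cons c r h1, if_pos h2]; simp
  | case4 c r h1 h2 h3 ih => rw [pvLines_cons c r h1, if_neg h2, h3]; simp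
  | case5 c r h1 h2 l ls h3 ih => rw [pvLines_cons c r h1, if_neg h2, h3]; simp

def pvConsume (pre s : List Char) : List (List Char) :=
  match pvLines s with
  | [] => if pre = [] then [] else [pre]
  | l :: ls => (pre ++ l) :: ls

theorem pvConsume_nil_eq (s : List Char) : pvConsume [] s = pvLines s := by
  cases hs : s with
  | nil => simp [pvConsume, pvLines_nil]
  | cons c t =>
      have h := pvLines_ne_nil s (by rw [hs]; simp)
      rw [← hs]
      cases h2 : pvLines s with
      | nil => exact absurd h2 h
      | cons l ls => simp [pvConsume, h2]

theorem pv_splitlines_go_spec (isB : Char → Bool) :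
    ∀ s, (∀ c ∈ s, isB c = (decide (c = '\n') || decide (c = '\r'))) →
      ∀ cur acc, PySem.Chars.splitlines.go isB s cur acc =
        acc.reverse ++ pvConsume cur.reverse s := by
  intro s
  induction s using pvLines.induct with
  | case1 =>
      intro _ cur acc
      rw [PySem.Chars.splitlines.go]
      by_cases hc : cur = []
      · simp [hc, pvConsume, pvLines_nil]
      · simp [pvConsume, pvLines_nil, hc, List.isEmpty_iff]
  | case2 r ih =>
      intro hs cur acc
      rw [PySem.Chars.splitlines.go, ih (fun c hc => hs c (by simp [hc]))]
      simp only [pvConsume, pvLines_crlf]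
      cases pvLines r <;> simp
  | case3 c r h1 h2 ih =>
      intro hs cur acc
      rw [PySem.Chars.splitlines.go]
      case x_3 => exact h1
      rw [if_pos (by rw [hs c (by simp)]; rcases h2 with h | h <;> simp [h]),
        ih (fun c hc => hs c (by simp [hc]))]
      simp only [pvConsume, pvLines_cons c r h1, if_pos h2]
      cases pvLines r <;> simp
  | case4 c r h1 h2 h3 ih =>
      intro hs cur acc
      rw [PySem.Chars.splitlines.go]
      case x_3 => exact h1
      rw [if_neg (by rw [hs c (by simp)]; push Not at h2; simp [h2.1, h2.2]),
        ih (fun c hc => hs c (by simp [hc]))]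
      simp only [pvConsume, pvLines_cons c r h1, if_neg h2, h3]
      simp
  | case5 c r h1 h2 l ls h3 ih =>
      intro hs cur acc
      rw [PySem.Chars.splitlines.go]
      case x_3 => exact h1
      rw [if_neg (by rw [hs c (by simp)]; push Not at h2; simp [h2.1, h2.2]),
        ih (fun c hc => hs c (by simp [hc]))]
      simp only [pvConsume, pvLines_cons c r h1, if_neg h2, h3]
      simp

theorem pv_char_eq_iff_toNat (c d : Char) : (c = d) ↔ c.toNat = d.toNat := by
  constructor
  · rintro rfl; rfl
  · intro h
    exact Char.ext_iff.mpr ((UInt32.toNat_inj (a := c.val) (b := d.val)).mp h)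

theorem pv_splitlines_eq (s : List Char) (hs : ∀ c ∈ s, pvDomChar c = true) :
    PySem.Chars.splitlines s = pvLines s := by
  rw [PySem.Chars.splitlines]
  rw [pv_splitlines_go_spec _ s ?_ [] []]
  · simp [pvConsume_nil_eq]
  · intro c hc
    have hdom := hs c hc
    simp only [pvDomChar, Bool.or_eq_true, Bool.and_eq_true, decide_eq_true_eq, beq_iff_eq] at hdom
    have hn := pv_char_eq_iff_toNat c '\n'
    have hr := pv_char_eq_iff_toNat c '\r'
    have hn' : ('\n' : Char).toNat = 10 := by decide
    have hr' : ('\r' : Char).toNat = 13 := by decide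
    rw [hn', ] at hn
    rw [hr'] at hr
    simp only [hn, hr]
    rcases Nat.lt_or_ge c.toNat 14 with _ | hbig
    · by_cases h10 : c.toNat = 10
      · simp [h10]
      · by_cases h13 : c.toNat = 13
        · simp [h13]
        · have : c.toNat ≠ 11 ∧ c.toNat ≠ 12 := by omega
          simp [h10, h13, this.1, this.2]
          omega
    · have : c.toNat ≤ 126 := by omega
      have hne : c.toNat ≠ 10 ∧ c.toNat ≠ 13 ∧ c.toNat ≠ 11 ∧ c.toNat ≠ 12 ∧ c.toNat ≠ 28 ∧
          c.toNat ≠ 29 ∧ c.toNat ≠ 30 ∧ c.toNat ≠ 133 ∧ c.toNat ≠ 8232 ∧ c.toNat ≠ 8233 := by omega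
      simp [hne.1, hne.2.1, hne.2.2.1, hne.2.2.2.1, hne.2.2.2.2.1, hne.2.2.2.2.2.1,
        hne.2.2.2.2.2.2.1, hne.2.2.2.2.2.2.2.1, hne.2.2.2.2.2.2.2.2.1, hne.2.2.2.2.2.2.2.2.2]

theorem pv_infix_singleton {a : Char} {l : List Char} : [a] <:+: l ↔ a ∈ l := by
  constructor
  · intro h; exact h.sublist.subset (by simp)
  · intro h
    obtain ⟨l1, l2, rfl⟩ := List.append_of_mem h
    exact ⟨l1, l2, by simp⟩

theorem pv_find_no_nl {s : List Char} (h : '\n' ∉ s) : PySem.Chars.find s ['\n'] = -1 :=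
  (PySem.Chars.find_eq_neg_one_iff s ['\n']).mpr (fun hin => h (pv_infix_singleton.mp hin))

theorem pv_find_go_nl {a : List Char} (ha : '\n' ∉ a) (r : List Char) :
    ∀ k, PySem.Chars.find.go ['\n'] (a ++ '\n' :: r) k = (k : Int) + a.length := by
  induction a with
  | nil =>
      intro k
      rw [PySem.Chars.find.go.eq_def]
      simp [List.isPrefixOf]
  | cons c t ih =>
      intro k
      simp only [List.cons_append]
      rw [PySem.Chars.find.go.eq_def]
      have hc : c ≠ '\n' := fun h => ha (by simp [h])
      simp only []
      rw [if_neg (by simp [List.isPrefixOf]; intro h; exact absurd h.symm hc)]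
      rw [ih (fun h => ha (by simp [h])) (k + 1)]
      simp only [List.length_cons]
      push_cast
      ring

theorem pv_find_nl {a : List Char} (ha : '\n' ∉ a) (r : List Char) :
    PySem.Chars.find (a ++ '\n' :: r) ['\n'] = (a.length : Int) := by
  rw [PySem.Chars.find, pv_find_go_nl ha r 0]
  simp

theorem pv_rfind_go_no_nl {s : List Char} (h : '\n' ∉ s) :
    ∀ j, PySem.Chars.rfind.go s ['\n'] j = -1 := by
  intro j
  induction j with
  | zero =>
      rw [PySem.Chars.rfind.go]
      rw [if_neg ?_]
      intro hp
      cases s with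
      | nil => simp [List.isPrefixOf] at hp
      | cons c t =>
          simp [List.isPrefixOf] at hp
          exact h (by simp [← hp])
  | succ n ih =>
      rw [PySem.Chars.rfind.go]
      rw [if_neg ?_, ih]
      intro hp
      have : '\n' ∈ List.drop (n + 1) s := by
        cases hd : List.drop (n + 1) s with
        | nil => rw [hd] at hp; simp [List.isPrefixOf] at hp
        | cons c t =>
            rw [hd] at hp; simp [List.isPrefixOf] at hp
            simp [← hp]
      exact h ((List.drop_sublist _ _).subset this)

theorem pv_rfind_no_nl {s : List Char} (h : '\n' ∉ s) :
    PySem.Chars.rfind s ['\n'] = -1 := by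
  rw [PySem.Chars.rfind]; exact pv_rfind_go_no_nl h _

theorem pv_rfind_go_nl {a y : List Char} (hy : '\n' ∉ y) :
    ∀ j, a.length ≤ j → PySem.Chars.rfind.go (a ++ '\n' :: y) ['\n'] j = (a.length : Int) := by
  intro j
  induction j with
  | zero =>
      intro hj
      have ha : a = [] := List.eq_nil_of_length_eq_zero (Nat.le_zero.mp hj)
      subst ha
      rw [PySem.Chars.rfind.go]
      simp [List.isPrefixOf]
  | succ n ih =>
      intro hj
      rw [PySem.Chars.rfind.go]
      rcases Nat.lt_or_ge n a.length with hlt | hge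
      · -- n + 1 = a.length
        have he : a.length = n + 1 := by omega
        rw [if_pos ?_]
        · omega
        · rw [show n + 1 = a.length + 0 from by omega, List.drop_append]
          simp [List.isPrefixOf, List.drop_eq_nil_of_le (le_refl a.length)]
      · -- n + 1 > a.length: drop lands inside y
        rw [if_neg ?_, ih hge]
        intro hp
        rw [List.drop_append, List.drop_eq_nil_of_le (by omega)] at hp
        have hstep : n + 1 - a.length = (n - a.length) + 1 := by omega
        rw [hstep, List.nil_append, List.drop_succ_cons] at hp
        have hmem : '\n' ∈ List.drop (n - a.length) y := by
          cases hd : List.drop (n - a.length) y with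
          | nil => rw [hd] at hp; simp [List.isPrefixOf] at hp
          | cons c t =>
              rw [hd] at hp; simp [List.isPrefixOf] at hp
              simp [← hp]
        exact hy ((List.drop_sublist _ _).subset hmem)

theorem pv_rfind_nl {a y : List Char} (hy : '\n' ∉ y) :
    PySem.Chars.rfind (a ++ '\n' :: y) ['\n'] = (a.length : Int) := by
  rw [PySem.Chars.rfind]
  exact pv_rfind_go_nl hy _ (by simp)

theorem pv_intercalate_cons_cons (s x y : List Char) (zs : List (List Char)) :
    List.intercalate s (x :: y :: zs) = x ++ s ++ List.intercalate s (y :: zs) := by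
  simp [List.intercalate, List.intersperse]

theorem pv_intercalate_append (s : List Char) (as bs : List (List Char))
    (ha : as ≠ []) (hb : bs ≠ []) :
    List.intercalate s (as ++ bs) = List.intercalate s as ++ s ++ List.intercalate s bs := by
  induction as with
  | nil => exact absurd rfl ha
  | cons x xs ih =>
      cases xs with
      | nil =>
          cases bs with
          | nil => exact absurd rfl hb
          | cons b bt => simp [List.intercalate]
      | cons y ys =>
          have hih := ih (by simp)
          simp only [List.cons_append] at hih
          simp only [List.cons_append]
          rw [pv_intercalate_cons_cons, hih, pv_intercalate_cons_cons]
          simp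

theorem pv_getLast?_cons_of_ne_nil (c : Char) (r : List Char) (h : r ≠ []) :
    (c :: r).getLast? = r.getLast? := by
  cases r with
  | nil => exact absurd rfl h
  | cons d t => simp [List.getLast?_cons_cons]

theorem pvNorm_generic (c : Char) (r : List Char) (h : c ≠ '\r') :
    pvNorm (c :: r) = c :: pvNorm r := by
  rw [pvNorm]
  case x_1 => exact fun t hc _ => h hc
  case x_2 => exact fun hc => h hc

theorem pvNorm_cr (r : List Char) (h : ∀ t, r ≠ '\n' :: t) :
    pvNorm ('\r' :: r) = '\n' :: pvNorm r := by
  rw [pvNorm]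
  case x_1 => exact fun t ht => h t ht

theorem pv_intercalate_cons_head (s : List Char) (c : Char) (l0 : List Char)
    (ls : List (List Char)) :
    List.intercalate s ((c :: l0) :: ls) = c :: List.intercalate s (l0 :: ls) := by
  cases ls with
  | nil => simp [List.intercalate]
  | cons y ys => rw [pv_intercalate_cons_cons, pv_intercalate_cons_cons]; simp

theorem pvLines_no_break (s : List Char) :
    ∀ l ∈ pvLines s, '\n' ∉ l ∧ '\r' ∉ l := by
  induction s using pvLines.induct with
  | case1 => simp [pvLines_nil]
  | case2 r ih =>
      rw [pvLines_crlf]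
      intro l hl
      rw [List.mem_cons] at hl
      rcases hl with rfl | hl
      · simp
      · exact ih l hl
  | case3 c r h1 h2 ih =>
      rw [pvLines_cons c r h1, if_pos h2]
      intro l hl
      rw [List.mem_cons] at hl
      rcases hl with rfl | hl
      · simp
      · exact ih l hl
  | case4 c r h1 h2 h3 ih =>
      rw [pvLines_cons c r h1, if_neg h2, h3]
      push Not at h2
      intro l hl
      rw [List.mem_cons] at hl
      rcases hl with rfl | hl
      · constructor <;> simp
        · exact fun h => absurd h.symm h2.1
        · exact fun h => absurd h.symm h2.2
      · simp at hl
  | case5 c r h1 h2 l0 ls h3 ih =>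
      rw [pvLines_cons c r h1, if_neg h2, h3]
      push Not at h2
      intro l hl
      rw [List.mem_cons] at hl
      rcases hl with rfl | hl
      · have := ih l0 (by rw [h3]; simp)
        constructor
        · simp [this.1]; exact fun h => absurd h.symm h2.1
        · simp [this.2]; exact fun h => absurd h.symm h2.2
      · exact ih l (by rw [h3]; simp [hl])

theorem pv_norm_intercalate (s : List Char) (hs : s ≠ [])
    (hlast : s.getLast? ≠ some '\n' ∧ s.getLast? ≠ some '\r') :
    pvNorm s = List.intercalate ['\n'] (pvLines s) := by
  induction s using pvLines.induct with
  | case1 => exact absurd rfl hs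
  | case2 r ih =>
      have hr : r ≠ [] := by
        rintro rfl
        exact hlast.1 (by simp)
      have hl : r.getLast? ≠ some '\n' ∧ r.getLast? ≠ some '\r' := by
        rwa [pv_getLast?_cons_of_ne_nil _ _ (by simp),
          pv_getLast?_cons_of_ne_nil _ _ hr] at hlast
      rw [pvNorm, pvLines_crlf]
      cases hpl : pvLines r with
      | nil => exact absurd hpl (pvLines_ne_nil r hr)
      | cons l ls =>
          rw [pv_intercalate_cons_cons, ← hpl, ← ih hr hl]
          simp
  | case3 c r h1 h2 ih =>
      have hr : r ≠ [] := by
        rintro rfl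
        rcases h2 with h | h <;> subst h
        · exact hlast.1 (by simp)
        · exact hlast.2 (by simp)
      have hl : r.getLast? ≠ some '\n' ∧ r.getLast? ≠ some '\r' := by
        rwa [pv_getLast?_cons_of_ne_nil _ _ hr] at hlast
      have hnorm : pvNorm (c :: r) = '\n' :: pvNorm r := by
        rcases h2 with h | h <;> subst h
        · exact pvNorm_generic _ _ (by decide)
        · exact pvNorm_cr _ (fun t ht => h1 t rfl ht)
      rw [hnorm, pvLines_cons c r h1, if_pos h2]
      cases hpl : pvLines r with
      | nil => exact absurd hpl (pvLines_ne_nil r hr)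
      | cons l ls =>
          rw [pv_intercalate_cons_cons, ← hpl, ← ih hr hl]
          simp
  | case4 c r h1 h2 h3 ih =>
      have hr : r = [] := by
        by_contra hr
        exact pvLines_ne_nil r hr h3
      subst hr
      push Not at h2
      rw [pvNorm_generic _ _ (fun h => h2.2 h), pvLines_cons c [] h1, if_neg (by push Not; exact h2),
        pvLines_nil]
      simp [pvNorm_nil, List.intercalate]
  | case5 c r h1 h2 l0 ls h3 ih =>
      have hr : r ≠ [] := by
        rintro rfl
        rw [pvLines_nil] at h3
        simp at h3
      have hl : r.getLast? ≠ some '\n' ∧ r.getLast? ≠ some '\r' := by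
        rwa [pv_getLast?_cons_of_ne_nil _ _ hr] at hlast
      push Not at h2
      rw [pvNorm_generic _ _ (fun h => h2.2 h), pvLines_cons c r h1,
        if_neg (by push Not; exact h2), h3, pv_intercalate_cons_head, ← h3, ← ih hr hl]


theorem pv_intercalate_allspace (W : List (List Char))
    (hW : ∀ l ∈ W, ∀ c ∈ l, PySem.Chars.isspace c = true) :
    ∀ c ∈ List.intercalate ['\n'] W, PySem.Chars.isspace c = true := by
  induction W with
  | nil => simp [List.intercalate]
  | cons w ws ih =>
      cases ws with
      | nil =>
          simpa [List.intercalate] using hW w (by simp)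
      | cons w2 ws2 =>
          rw [pv_intercalate_cons_cons]
          intro c hc
          simp only [List.append_assoc, List.mem_append] at hc
          rcases hc with h | h | h
          · exact hW w (by simp) c h
          · simp at h; subst h; decide
          · exact ih (fun l hl => hW l (by simp [hl])) c h

theorem pv_core (M : List (List Char)) (hM : ∀ l ∈ M, '\n' ∉ l) :
    PySem.Chars.strip
      (if PySem.Chars.strip (PySem.List.slice (PySem.Chars.rstrip (List.intercalate ['\n'] M))
            (some (PySem.Chars.rfind (PySem.Chars.rstrip (List.intercalate ['\n'] M)) ['\n'] + 1)) none)
          = ['`', '`', '`'] then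
        PySem.List.slice (PySem.Chars.rstrip (List.intercalate ['\n'] M)) none
          (some (PySem.Chars.rfind (PySem.Chars.rstrip (List.intercalate ['\n'] M)) ['\n'] + 1))
      else PySem.Chars.rstrip (List.intercalate ['\n'] M)) =
    PySem.Chars.strip (PySem.Chars.join ['\n']
      (match (pvPopBlank M).getLast? with
       | some last =>
           if PySem.Chars.strip last = ['`', '`', '`'] then (pvPopBlank M).dropLast
           else pvPopBlank M
       | none => pvPopBlank M)) := by
  have hblank : ∀ l : List Char, ((PySem.Chars.strip l).isEmpty = true) ↔
      (∀ c ∈ l, PySem.Chars.isspace c = true) := by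
    intro l
    rw [List.isEmpty_iff, pv_strip_eq_nil_iff]
  have hMdecomp : M = pvPopBlank M ++ (M.reverse.takeWhile (fun l => (PySem.Chars.strip l).isEmpty)).reverse := by
    conv_lhs => rw [← M.reverse_reverse,
      ← List.takeWhile_append_dropWhile (p := fun l => (PySem.Chars.strip l).isEmpty) (l := M.reverse)]
    rw [List.reverse_append]
    rfl
  set W := (M.reverse.takeWhile (fun l => (PySem.Chars.strip l).isEmpty)).reverse with hWdef
  have hWblank : ∀ l ∈ W, ∀ c ∈ l, PySem.Chars.isspace c = true := by
    intro l hl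
    rw [← hblank l]
    have : l ∈ M.reverse.takeWhile (fun l => (PySem.Chars.strip l).isEmpty) := by
      rw [hWdef] at hl
      simpa using hl
    exact List.mem_takeWhile_imp (p := fun l => (PySem.Chars.strip l).isEmpty) this
  cases hD : M.reverse.dropWhile (fun l => (PySem.Chars.strip l).isEmpty) with
  | nil =>
      -- every line is blank: both sides are the empty string
      have hM' : pvPopBlank M = [] := by simp [pvPopBlank, hD]
      have hall : ∀ c ∈ List.intercalate ['\n'] M, PySem.Chars.isspace c = true := by
        apply pv_intercalate_allspace
        intro l hl
        apply hWblank
        have hMW : M = W := by conv_lhs => rw [hMdecomp, hM', List.nil_append]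
        exact hMW ▸ hl
      have hrs : PySem.Chars.rstrip (List.intercalate ['\n'] M) = [] :=
        (pv_rstrip_eq_nil_iff _).mpr hall
      rw [hrs, hM']
      have hrf : PySem.Chars.rfind ([] : List Char) ['\n'] = -1 := pv_rfind_no_nl (by simp)
      rw [hrf]
      norm_num
      decide
  | cons d D' =>
      -- M' = D'.reverse ++ [d], with strip d ≠ []
      have hM' : pvPopBlank M = D'.reverse ++ [d] := by simp [pvPopBlank, hD]
      have hxblank : ¬ ((PySem.Chars.strip d).isEmpty = true) := by
        have := List.head_dropWhile_not (p := fun l => (PySem.Chars.strip l).isEmpty) (l := M.reverse)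
        rw [hD] at this
        simpa using this (by simp)
      have hx : PySem.Chars.strip d ≠ [] := by
        rwa [List.isEmpty_iff] at hxblank
      have hrx : PySem.Chars.rstrip d ≠ [] := by
        intro h
        exact hx ((pv_strip_eq_nil_iff d).mpr ((pv_rstrip_eq_nil_iff d).mp h))
      have hdM : d ∈ M := by
        rw [hMdecomp, hM']
        simp
      have hnd : '\n' ∉ d := hM d hdM
      have hnrx : '\n' ∉ PySem.Chars.rstrip d := by
        intro h
        obtain ⟨w, hw, _⟩ := pv_rstrip_decomp d
        exact hnd (by rw [hw]; exact List.mem_append.mpr (Or.inl h))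
      -- body1 = rstrip (intercalate M')
      have hbody1 : PySem.Chars.rstrip (List.intercalate ['\n'] M) =
          PySem.Chars.rstrip (List.intercalate ['\n'] (pvPopBlank M)) := by
        by_cases hWnil : W = []
        · conv_lhs => rw [hMdecomp, hWnil, List.append_nil]
        · conv_lhs => rw [hMdecomp, pv_intercalate_append _ _ _ (by rw [hM']; simp) hWnil,
            List.append_assoc]
          apply pv_rstrip_append_space
          intro c hc
          rcases List.mem_append.mp hc with h | h
          · simp at h; subst h; decide
          · exact pv_intercalate_allspace W hWblank c h
      cases hN : D'.reverse with
      | nil =>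
          -- single non-blank line d
          have hM'2 : pvPopBlank M = [d] := by rw [hM', hN]; simp
          have hb1 : PySem.Chars.rstrip (List.intercalate ['\n'] M) = PySem.Chars.rstrip d := by
            rw [hbody1, hM'2]; simp [List.intercalate]
          rw [hb1, pv_rfind_no_nl hnrx]
          norm_num
          rw [PySem.List.slice_to _ (by norm_num : (0:Int) ≤ 0)]
          simp only [Int.toNat_zero, List.take_zero]
          rw [pv_strip_rstrip, hM'2]
          simp only [List.getLast?_singleton]
          by_cases hc : PySem.Chars.strip d = ['`', '`', '`']
          · rw [if_pos hc, if_pos hc]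
            simp [PySem.Chars.join, List.intercalate]
          · rw [if_neg hc, if_neg hc, pv_strip_rstrip]
            simp [PySem.Chars.join, List.intercalate]
      | cons n0 ns =>
          -- at least two lines: N = n0 :: ns, M' = N ++ [d]
          set N := n0 :: ns with hNdef
          have hM'2 : pvPopBlank M = N ++ [d] := by rw [hM', hN]
          have hIM' : List.intercalate ['\n'] (pvPopBlank M) =
              List.intercalate ['\n'] N ++ '\n' :: d := by
            rw [hM'2, pv_intercalate_append _ _ _ (by simp [hNdef]) (by simp)]
            simp [List.intercalate]
          have hb1 : PySem.Chars.rstrip (List.intercalate ['\n'] M) =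
              List.intercalate ['\n'] N ++ '\n' :: PySem.Chars.rstrip d := by
            rw [hbody1, hIM']
            have := pv_rstrip_append_of_ne_nil hrx (List.intercalate ['\n'] N ++ ['\n'])
            simpa using this
          rw [hb1, pv_rfind_nl hnrx]
          have hlen : ((List.intercalate ['\n'] N).length : Int) + 1 =
              (((List.intercalate ['\n'] N).length + 1 : Nat) : Int) := by push_cast; ring
          rw [hlen, PySem.List.slice_from _ (by positivity), PySem.List.slice_to _ (by positivity)]
          simp only [Int.toNat_natCast]
          have hdrop : List.drop ((List.intercalate ['\n'] N).length + 1)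
              (List.intercalate ['\n'] N ++ '\n' :: PySem.Chars.rstrip d) = PySem.Chars.rstrip d := by
            rw [show (List.intercalate ['\n'] N).length + 1 = (List.intercalate ['\n'] N).length + 1 from rfl,
              List.drop_append, List.drop_eq_nil_of_le (by omega)]
            simp
          have htake : List.take ((List.intercalate ['\n'] N).length + 1)
              (List.intercalate ['\n'] N ++ '\n' :: PySem.Chars.rstrip d) =
              List.intercalate ['\n'] N ++ ['\n'] := by
            rw [List.take_append, List.take_of_length_le (by omega)]
            simp
          rw [hdrop, htake, pv_strip_rstrip, hM'2]
          have hgl : (N ++ [d]).getLast? = some d := by simp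
          simp only [hgl]
          by_cases hc : PySem.Chars.strip d = ['`', '`', '`']
          · rw [if_pos hc, if_pos hc]
            rw [pv_strip_append_space (by intro c hc2; simp at hc2; subst hc2; decide) _]
            simp [PySem.Chars.join]
          · rw [if_neg hc, if_neg hc]
            obtain ⟨w, hw, hwsp⟩ := pv_rstrip_decomp d
            have : List.intercalate ['\n'] (N ++ [d]) =
                (List.intercalate ['\n'] N ++ '\n' :: PySem.Chars.rstrip d) ++ w := by
              rw [pv_intercalate_append _ _ _ (by simp [hNdef]) (by simp)]
              conv_lhs => rw [hw]
              simp [List.intercalate]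
            rw [PySem.Chars.join, this, pv_strip_append_space hwsp]


theorem pv_strip_sublist (l : List Char) : List.Sublist (PySem.Chars.strip l) l := by
  have h1 : List.Sublist (PySem.Chars.lstrip l) l := List.dropWhile_sublist _
  have h2 : List.Sublist (PySem.Chars.rstrip (PySem.Chars.lstrip l)) (PySem.Chars.lstrip l) := by
    simpa [PySem.Chars.rstrip] using (List.dropWhile_sublist (p := PySem.Chars.isspace)
      (l := (PySem.Chars.lstrip l).reverse)).reverse
  exact h2.trans h1

theorem pv_strip_getLast_not_space (l : List Char) (c : Char)
    (h : (PySem.Chars.strip l).getLast? = some c) : PySem.Chars.isspace c = false := by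
  rw [PySem.Chars.strip, PySem.Chars.rstrip, List.getLast?_reverse] at h
  cases hd : List.dropWhile PySem.Chars.isspace (PySem.Chars.lstrip l).reverse with
  | nil => rw [hd] at h; simp at h
  | cons a t =>
      rw [hd] at h
      simp at h
      subst h
      have := List.head_dropWhile_not (p := PySem.Chars.isspace) (l := (PySem.Chars.lstrip l).reverse)
      rw [hd] at this
      simpa using this (by simp)

-- ===== VERDICT (by name: the statement is the Claim_ definition above) =====
theorem strip_markdown_code_fence_py_spec : Claim_equal_strip_markdown_code_fence_py := by
  intro text hdom
  unfold Spec_strip_markdown_code_fence_py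
  unfold strip_markdown_code_fence_py strip_markdown_code_fence_py_alt
  simp only []
  by_cases hsw : PySem.Chars.startswith (PySem.Chars.strip text.toList) ['`', '`', '`'] = false
  · rw [if_pos hsw, if_pos hsw]
  · rw [if_neg hsw, if_neg hsw]
    have hswt : PySem.Chars.startswith (PySem.Chars.strip text.toList) ['`', '`', '`'] = true := by
      revert hsw; cases PySem.Chars.startswith (PySem.Chars.strip text.toList) ['`', '`', '`'] <;> simp
    have hdomL : ∀ c ∈ text.toList, pvDomChar c = true := by
      have : pvDomStr text = true := hdom
      rw [pvDomStr, List.all_eq_true] at this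
      intro c hc
      simpa using this c hc
    have hdomS : ∀ c ∈ PySem.Chars.strip text.toList, pvDomChar c = true :=
      fun c hc => hdomL c ((pv_strip_sublist text.toList).subset hc)
    have hne : PySem.Chars.strip text.toList ≠ [] := by
      intro h
      rw [PySem.Chars.startswith, h] at hswt
      simp [List.isPrefixOf] at hswt
    have hlast : (PySem.Chars.strip text.toList).getLast? ≠ some '\n' ∧
        (PySem.Chars.strip text.toList).getLast? ≠ some '\r' := by
      constructor <;> intro h <;>
        exact absurd (pv_strip_getLast_not_space text.toList _ h) (by decide)
    rw [pv_splitlines_eq _ hdomS]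
    cases hpl : pvLines (PySem.Chars.strip text.toList) with
    | nil => exact absurd hpl (pvLines_ne_nil _ hne)
    | cons l0 M =>
        rw [if_neg (by simp)]
        simp only [List.tail_cons]
        have hnb := pvLines_no_break (PySem.Chars.strip text.toList)
        rw [hpl] at hnb
        have hnorm : PySem.Chars.replace
            (PySem.Chars.replace (PySem.Chars.strip text.toList) ['\r', '\n'] ['\n']) ['\r'] ['\n'] =
            List.intercalate ['\n'] (l0 :: M) := by
          rw [pv_norm_eq, pv_norm_intercalate _ hne hlast, hpl]
        rw [hnorm]
        have hMfree : ∀ l ∈ M, '\n' ∉ l := fun l hl => (hnb l (by simp [hl])).1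
        cases M with
        | nil =>
            have hfind : PySem.Chars.find (List.intercalate ['\n'] [l0]) ['\n'] = -1 := by
              apply pv_find_no_nl
              simpa [List.intercalate] using (hnb l0 (by simp)).1
            rw [hfind, if_pos rfl]
            have hcore := pv_core [] (by simp)
            have h0 : List.intercalate ['\n'] ([] : List (List Char)) = [] := by
              simp [List.intercalate]
            rw [h0] at hcore
            exact congrArg String.ofList hcore.symm
        | cons m ms =>
            have hshape : List.intercalate ['\n'] (l0 :: m :: ms) =
                l0 ++ '\n' :: List.intercalate ['\n'] (m :: ms) := by
              rw [pv_intercalate_cons_cons]; simp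
            have hfind : PySem.Chars.find (List.intercalate ['\n'] (l0 :: m :: ms)) ['\n'] =
                (l0.length : Int) := by
              rw [hshape]; exact pv_find_nl (hnb l0 (by simp)).1 _
            rw [hfind]
            rw [if_neg (show ¬((l0.length : Int) = -1) by omega)]
            have hcast : (l0.length : Int) + 1 = ((l0.length + 1 : Nat) : Int) := by push_cast; ring
            have hdrop : List.drop (l0.length + 1) (List.intercalate ['\n'] (l0 :: m :: ms)) =
                List.intercalate ['\n'] (m :: ms) := by
              rw [hshape, List.drop_append, List.drop_eq_nil_of_le (by omega)]
              simp
            have hbody0 : PySem.List.slice (List.intercalate ['\n'] (l0 :: m :: ms))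
                (some ((l0.length : Int) + 1)) none = List.intercalate ['\n'] (m :: ms) := by
              rw [hcast, PySem.List.slice_from _ (by positivity), Int.toNat_natCast]
              exact hdrop
            rw [hbody0]
            exact congrArg String.ofList (pv_core (m :: ms) hMfree).symm
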